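-- pv_equiv track=rewrite | github.com/alopezfederico/Seminario-Python---Actividad-02 | src/Ejercicio3.py | reemplazar_una_palabra
-- ===== SOURCE A (Python) =====
-- def reemplazar_una_palabra(texto, spoiler):
--     # Esta función reemplaza una palabra spoiler por asteriscos
--     # sin distinguir mayúsculas de minúsculas
--     texto_minuscula = texto.lower()
--     spoiler_minuscula = spoiler.lower()
--
--     resultado = ""
--     i = 0
--
--     while i < len(texto):
--         fragmento = texto_minuscula[i:i + len(spoiler)]
--
--         if fragmento == spoiler_minuscula:
--             resultado += "*" * len(spoiler)
--             i += len(spoiler)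
--         else:
--             resultado += texto[i]
--             i += 1
--
--     return resultado
-- ===== SOURCE B (Python) =====
-- def reemplazar_una_palabra(texto, spoiler):
--     # Split the lowered text on the lowered spoiler: the parts are the untouched
--     # segments between non-overlapping matches.  Rebuild from the ORIGINAL texto
--     # (to preserve casing), inserting the censor bar between consecutive parts.
--     partes = texto.lower().split(spoiler.lower())
--     censura = "*" * len(spoiler)
--     resultado = texto[:len(partes[0])]
--     pos = len(partes[0])
--     for parte in partes[1:]:
--         pos += len(spoiler)
--         resultado += censura + texto[pos:pos + len(parte)]
--         pos += len(parte)
--     return resultado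
-- ===== Notes on version B (the rewrite author's own statement) =====
-- stated objective: alternative
-- what changed: A scans character by character comparing a lowered slice at every position; B lowers once, splits the lowered text on the lowered spoiler (C-level str.split does all the matching), and rebuilds the result from original-case slices of texto with '*'*len(spoiler) between consecutive parts.
-- outside the precondition, e.g. on reemplazar_una_palabra('', ''): A returns '', B raises ValueError
import Mathlib
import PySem

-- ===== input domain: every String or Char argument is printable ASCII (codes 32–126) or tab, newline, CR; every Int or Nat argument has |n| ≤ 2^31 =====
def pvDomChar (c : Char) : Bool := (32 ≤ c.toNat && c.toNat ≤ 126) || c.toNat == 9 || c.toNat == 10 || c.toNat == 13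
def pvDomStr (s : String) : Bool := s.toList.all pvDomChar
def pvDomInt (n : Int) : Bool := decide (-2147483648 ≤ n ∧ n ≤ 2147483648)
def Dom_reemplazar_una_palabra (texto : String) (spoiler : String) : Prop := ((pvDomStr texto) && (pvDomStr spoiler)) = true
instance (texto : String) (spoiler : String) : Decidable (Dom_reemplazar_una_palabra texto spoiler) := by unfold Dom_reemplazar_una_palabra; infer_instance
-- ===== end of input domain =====

-- B replaces A's per-character scan by split-on-lowered-spoiler + a reconstruction pass over
-- the original-case text (objective: alternative decomposition; the Python B is also faster in
-- practice because str.split does the scanning); equivalence is proved for non-empty spoiler.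

-- ===== PORT A =====
-- A's while loop, transliterated with an explicit fuel counter; fuel = len(texto) suffices for any
-- non-empty spoiler (every iteration advances i by at least 1); on the empty spoiler the Python
-- loop never terminates, which Pre_ excludes (the fuel guard only makes the port total).
def pvAgo (t tmin sl : List Char) : Nat → Nat → List Char → List Char
  | 0, _, res => res
  | fuel+1, i, res =>
    if i < t.length then
      -- fragmento = texto_minuscula[i:i + len(spoiler)] — in-range Nat slice = drop/take (PySem.List.slice_natCast_add)
      let fragmento := (tmin.drop i).take sl.length
      if fragmento = sl then
        pvAgo t tmin sl fuel (i + sl.length) (res ++ List.replicate sl.length '*')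
      else
        -- texto[i], with i < len(texto), is exactly getD
        pvAgo t tmin sl fuel (i + 1) (res ++ [t.getD i ' '])
    else res

def reemplazar_una_palabra (texto : String) (spoiler : String) : String :=
  let t := texto.toList
  let tmin := PySem.Chars.lower t
  let sl := PySem.Chars.lower spoiler.toList   -- len(spoiler) = sl.length (lower preserves length)
  String.ofList (pvAgo t tmin sl t.length 0 [])

-- ===== PORT B =====
-- the for-loop over partes[1:]: pos += len(spoiler); resultado += censura + texto[pos:pos+len(parte)]; pos += len(parte)
def pvBgo (t cens : List Char) (m : Nat) : List (List Char) → Nat → List Char → List Char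
  | [], _, res => res
  | parte :: rest, pos, res =>
      pvBgo t cens m rest (pos + m + parte.length)
        (res ++ cens ++ ((t.drop (pos + m)).take parte.length))  -- texto[pos:pos+len(parte)], Nat bounds: drop/take

def reemplazar_una_palabra_alt (texto : String) (spoiler : String) : String :=
  let t := texto.toList
  let sl := PySem.Chars.lower spoiler.toList   -- len(spoiler) = sl.length
  if sl = [] then ""   -- Python's split("") raises ValueError here; outside Pre_ (totality guard only)
  else
    match PySem.Chars.splitOn (PySem.Chars.lower t) sl with
    | [] => ""         -- unreachable: str.split never returns an empty list (totality guard only)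
    | p0 :: rest =>
        String.ofList (pvBgo t (List.replicate sl.length '*') sl.length rest p0.length (t.take p0.length))

-- ===== PRECONDITION & SPEC =====
-- Pre_ excludes only the empty spoiler: there A infinite-loops on every non-empty texto (and returns ""
-- only in the degenerate all-empty case), while B's str.split raises ValueError.
def Pre_reemplazar_una_palabra (texto : String) (spoiler : String) : Prop := spoiler ≠ ""
instance (texto : String) (spoiler : String) : Decidable (Pre_reemplazar_una_palabra texto spoiler) := by unfold Pre_reemplazar_una_palabra; infer_instance
def pvWitness_reemplazar_una_palabra : String × String := ("Hola HOLA mundo", "hola")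
def Spec_reemplazar_una_palabra (texto : String) (spoiler : String) (out : String) : Prop := out = reemplazar_una_palabra_alt texto spoiler
instance (texto : String) (spoiler : String) (out : String) : Decidable (Spec_reemplazar_una_palabra texto spoiler out) := by unfold Spec_reemplazar_una_palabra; infer_instance

-- ===== CLAIM (what is proved, stated in full; the proofs are below) =====
def Claim_equal_reemplazar_una_palabra : Prop := ∀ (texto : String) (spoiler : String), Dom_reemplazar_una_palabra texto spoiler → Pre_reemplazar_una_palabra texto spoiler → Spec_reemplazar_una_palabra texto spoiler (reemplazar_una_palabra texto spoiler)

-- ===== LEMMAS AND PROOFS =====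

-- The common spec: A's scan phrased as structural recursion on the aligned (original, lowered) suffixes.
def pvSpec (sl : List Char) : List Char → List Char → List Char
  | [], _ => []
  | c :: t', tl =>
    if h : sl ≠ [] ∧ sl.isPrefixOf tl then
      List.replicate sl.length '*' ++ pvSpec sl (List.drop sl.length (c :: t')) (List.drop sl.length tl)
    else
      c :: pvSpec sl t' tl.tail
termination_by t _ => t.length
decreasing_by
  · have hm : 0 < sl.length := List.length_pos_of_ne_nil h.1
    simp; omega
  · simp

-- Structural characterization of PySem.Chars.splitOn.go (fuel never runs out when fuel > |l|).
def pvParts (sl : List Char) : List Char → List Char → List (List Char)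
  | [], cur => [cur.reverse]
  | c :: rest, cur =>
    if h : sl ≠ [] ∧ sl.isPrefixOf (c :: rest) then
      cur.reverse :: pvParts sl (List.drop sl.length (c :: rest)) []
    else
      pvParts sl rest (c :: cur)
termination_by l _ => l.length
decreasing_by
  · have hm : 0 < sl.length := List.length_pos_of_ne_nil h.1
    simp; omega
  · simp

def pvTail (cens : List Char) (m : Nat) : List Char → List (List Char) → List Char
  | _, [] => []
  | suf, p :: rest => cens ++ (suf.drop m).take p.length ++ pvTail cens m (suf.drop (m + p.length)) rest

def pvGlue (cens : List Char) (m : Nat) (t cur : List Char) (parts : List (List Char)) : List Char :=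
  match parts with
  | [] => []
  | p0 :: rest => t.take (p0.length - cur.length) ++ pvTail cens m (t.drop (p0.length - cur.length)) rest

lemma pvGo_eq_pvParts (sl : List Char) (hsl : sl ≠ []) :
    ∀ fuel l cur acc, l.length < fuel →
      PySem.Chars.splitOn.go sl fuel l cur acc = acc.reverse ++ pvParts sl l cur := by
  intro fuel
  induction fuel with
  | zero => intro l cur acc h; omega
  | succ fuel ih =>
    intro l cur acc h
    cases l with
    | nil =>
      rw [PySem.Chars.splitOn.go]
      · simp [pvParts]
      · simp
    | cons c rest =>
      rw [PySem.Chars.splitOn.go]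
      rw [pvParts]
      have hm : 0 < sl.length := List.length_pos_of_ne_nil hsl
      have hfu : rest.length < fuel := by simp at h; omega
      by_cases hp : sl.isPrefixOf (c :: rest) = true
      · rw [if_pos hp, dif_pos ⟨hsl, hp⟩]
        rw [ih _ _ _ (by simp; omega)]
        simp
      · rw [if_neg hp, dif_neg (by tauto)]
        rw [ih _ _ _ hfu]

lemma pvParts_ne_nil (sl : List Char) : ∀ l cur, pvParts sl l cur ≠ [] := by
  intro l cur
  induction l, cur using pvParts.induct sl with
  | case1 cur => simp [pvParts]
  | case2 c rest cur h ih => rw [pvParts, dif_pos h]; simp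
  | case3 c rest cur h ih => rw [pvParts, dif_neg h]; exact ih

lemma pvParts_head_len (sl : List Char) : ∀ l cur, cur.length ≤ ((pvParts sl l cur).headD []).length := by
  intro l cur
  induction l, cur using pvParts.induct sl with
  | case1 cur => simp [pvParts]
  | case2 c rest cur h ih => rw [pvParts, dif_pos h]; simp
  | case3 c rest cur h ih =>
    rw [pvParts, dif_neg h]
    simp only [List.length_cons] at ih
    omega

lemma pvBgo_eq_pvTail (t cens : List Char) (m : Nat) :
    ∀ parts pos res, pvBgo t cens m parts pos res = res ++ pvTail cens m (t.drop pos) parts := by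
  intro parts
  induction parts with
  | nil => intro pos res; simp [pvBgo, pvTail]
  | cons p rest ih =>
    intro pos res
    rw [pvBgo, pvTail, ih]
    have h1 : (t.drop pos).drop m = t.drop (pos + m) := by rw [List.drop_drop]
    have h2 : (t.drop pos).drop (m + p.length) = t.drop (pos + m + p.length) := by
      rw [List.drop_drop, Nat.add_assoc]
    rw [h1, h2]
    simp

lemma pvGlue_eq_pvSpec (sl : List Char) (hsl : sl ≠ []) :
    ∀ tl t cur, t.length = tl.length →
      pvGlue (List.replicate sl.length '*') sl.length t cur (pvParts sl tl cur) = pvSpec sl t tl := by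
  intro tl t cur
  induction tl, cur using pvParts.induct sl generalizing t with
  | case1 cur =>
    intro hlen
    cases t with
    | nil => simp [pvParts, pvGlue, pvTail, pvSpec]
    | cons a t' => simp at hlen
  | case2 c rest cur h ih =>
    intro hlen
    have hm : 0 < sl.length := List.length_pos_of_ne_nil hsl
    cases t with
    | nil => simp at hlen
    | cons a t' =>
      rw [pvParts, dif_pos h]
      rw [pvSpec, dif_pos h]
      obtain ⟨p0', rest', hpr⟩ : ∃ p0' rest', pvParts sl (List.drop sl.length (c :: rest)) [] = p0' :: rest' := by
        cases hx : pvParts sl (List.drop sl.length (c :: rest)) [] with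
        | nil => exact absurd hx (pvParts_ne_nil sl _ _)
        | cons x y => exact ⟨x, y, rfl⟩
      rw [hpr]
      have e1 : pvGlue (List.replicate sl.length '*') sl.length (a :: t') cur (cur.reverse :: p0' :: rest')
          = pvTail (List.replicate sl.length '*') sl.length (a :: t') (p0' :: rest') := by
        simp [pvGlue]
      rw [e1, pvTail]
      have hlen' : ((a :: t').drop sl.length).length = ((c :: rest).drop sl.length).length := by
        simp only [List.length_cons] at hlen
        simp only [List.length_drop, List.length_cons]
        omega
      have ihx := ih ((a :: t').drop sl.length) hlen'
      rw [hpr] at ihx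
      have e2 : pvGlue (List.replicate sl.length '*') sl.length ((a :: t').drop sl.length) [] (p0' :: rest')
          = ((a :: t').drop sl.length).take p0'.length
            ++ pvTail (List.replicate sl.length '*') sl.length (((a :: t').drop sl.length).drop p0'.length) rest' := by
        simp [pvGlue]
      rw [e2] at ihx
      have hd2 : ((a :: t').drop sl.length).drop p0'.length = (a :: t').drop (sl.length + p0'.length) := by
        rw [List.drop_drop, Nat.add_comm]
      rw [hd2] at ihx
      rw [← ihx]
      simp
  | case3 c rest cur h ih =>
    intro hlen
    cases t with
    | nil => simp at hlen
    | cons a t' =>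
      rw [pvParts, dif_neg h]
      rw [pvSpec, dif_neg h]
      obtain ⟨p0, rest2, hpr⟩ : ∃ p0 rest2, pvParts sl rest (c :: cur) = p0 :: rest2 := by
        cases hx : pvParts sl rest (c :: cur) with
        | nil => exact absurd hx (pvParts_ne_nil sl _ _)
        | cons x y => exact ⟨x, y, rfl⟩
      have hhead := pvParts_head_len sl rest (c :: cur)
      rw [hpr] at hhead
      simp only [List.headD_cons, List.length_cons] at hhead
      have hlen' : t'.length = rest.length := by simpa using hlen
      have ihx := ih t' hlen'
      rw [hpr] at ihx ⊢
      have hk : p0.length - cur.length = (p0.length - (cur.length + 1)) + 1 := by omega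
      have e1 : pvGlue (List.replicate sl.length '*') sl.length (a :: t') cur (p0 :: rest2)
          = (a :: t').take (p0.length - cur.length)
            ++ pvTail (List.replicate sl.length '*') sl.length ((a :: t').drop (p0.length - cur.length)) rest2 := by
        simp [pvGlue]
      have e2 : pvGlue (List.replicate sl.length '*') sl.length t' (c :: cur) (p0 :: rest2)
          = t'.take (p0.length - (cur.length + 1))
            ++ pvTail (List.replicate sl.length '*') sl.length (t'.drop (p0.length - (cur.length + 1))) rest2 := by
        simp [pvGlue]
      rw [e1, hk, List.take_succ_cons, List.drop_succ_cons]
      rw [e2] at ihx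
      rw [List.tail_cons, ← ihx]
      simp

lemma pvAgo_eq_pvSpec (t tmin sl : List Char) (hsl : sl ≠ []) (hlen : tmin.length = t.length) :
    ∀ fuel i res, t.length ≤ i + fuel →
      pvAgo t tmin sl fuel i res = res ++ pvSpec sl (t.drop i) (tmin.drop i) := by
  intro fuel
  induction fuel with
  | zero =>
    intro i res h
    have h1 : t.drop i = [] := List.drop_eq_nil_of_le (by omega)
    rw [pvAgo, h1, pvSpec]
    simp
  | succ fuel ih =>
    intro i res h
    have hm : 0 < sl.length := List.length_pos_of_ne_nil hsl
    rw [pvAgo]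
    by_cases hi : i < t.length
    · simp only [hi, if_true]
      cases hd : t.drop i with
      | nil => rw [List.drop_eq_nil_iff] at hd; omega
      | cons a t'' =>
        by_cases hf : (tmin.drop i).take sl.length = sl
        · have hp : sl.isPrefixOf (tmin.drop i) = true := by
            rw [List.isPrefixOf_iff_prefix, List.prefix_iff_eq_take]
            exact hf.symm
          rw [if_pos hf]
          rw [ih _ _ (by omega)]
          have h1 : List.drop sl.length (t.drop i) = t.drop (i + sl.length) := by
            rw [List.drop_drop, Nat.add_comm]
          have h2 : List.drop sl.length (tmin.drop i) = tmin.drop (i + sl.length) := by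
            rw [List.drop_drop, Nat.add_comm]
          rw [pvSpec, dif_pos ⟨hsl, hp⟩, ← hd, h1, h2]
          simp
        · have hp : ¬ sl.isPrefixOf (tmin.drop i) = true := by
            rw [List.isPrefixOf_iff_prefix, List.prefix_iff_eq_take]
            exact fun hx => hf hx.symm
          rw [if_neg hf]
          rw [ih _ _ (by omega)]
          rw [pvSpec, dif_neg (by tauto)]
          have ha : t.getD i ' ' = a := by
            cases hq : t[i]? with
            | none => rw [List.getElem?_eq_none_iff] at hq; omega
            | some b =>
              have hz : (t.drop i)[0]? = t[i]? := by simp [List.getElem?_drop]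
              rw [hd, hq] at hz
              simp at hz
              simp [List.getD, hq, hz]
          have h1 : t.drop (i + 1) = t'' := by
            rw [List.drop_add_one_eq_tail_drop, hd]
            rfl
          have h2 : tmin.drop (i + 1) = (tmin.drop i).tail := by
            rw [List.drop_add_one_eq_tail_drop]
          rw [ha, h1, h2]
          simp
    · simp only [hi, if_false]
      have h1 : t.drop i = [] := List.drop_eq_nil_of_le (by omega)
      rw [h1, pvSpec]
      simp

-- ===== VERDICT (by name: the statement is the Claim_ definition above) =====
theorem reemplazar_una_palabra_spec : Claim_equal_reemplazar_una_palabra := by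
  intro texto spoiler _ hpre
  unfold Spec_reemplazar_una_palabra
  unfold reemplazar_una_palabra reemplazar_una_palabra_alt
  set t := texto.toList with ht
  set tmin := PySem.Chars.lower t with htmin
  set sl := PySem.Chars.lower spoiler.toList with hsl
  have hslne : sl ≠ [] := by
    rw [hsl]
    simp [PySem.Chars.lower]
    exact hpre
  have hlen : tmin.length = t.length := by simp [htmin, PySem.Chars.lower]
  have hA : pvAgo t tmin sl t.length 0 [] = pvSpec sl t tmin := by
    have := pvAgo_eq_pvSpec t tmin sl hslne hlen t.length 0 [] (by omega)
    simpa using this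
  have hsplit : PySem.Chars.splitOn tmin sl = pvParts sl tmin [] := by
    unfold PySem.Chars.splitOn
    rw [pvGo_eq_pvParts sl hslne (tmin.length + 1) tmin [] [] (by omega)]
    simp
  rw [if_neg hslne, hsplit]
  obtain ⟨p0, rest, hpr⟩ : ∃ p0 rest, pvParts sl tmin [] = p0 :: rest := by
    cases hx : pvParts sl tmin [] with
    | nil => exact absurd hx (pvParts_ne_nil sl _ _)
    | cons x y => exact ⟨x, y, rfl⟩
  rw [hpr]
  have hB : pvBgo t (List.replicate sl.length '*') sl.length rest p0.length (t.take p0.length)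
      = pvSpec sl t tmin := by
    rw [pvBgo_eq_pvTail]
    have hg := pvGlue_eq_pvSpec sl hslne tmin t [] hlen.symm
    rw [hpr] at hg
    simpa [pvGlue] using hg
  show String.ofList (pvAgo t tmin sl t.length 0 []) = String.ofList
    (pvBgo t (List.replicate sl.length '*') sl.length rest p0.length (t.take p0.length))
  rw [hA, hB]
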